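-- pv_equiv track=rewrite | github.com/lGodHatesMel/RandomResources | Scripts/Bots/GHM_DiscordBot/cogs/PokemonStuff.py | format_set_details
-- ===== SOURCE A (Python) =====
-- def format_set_details(set_details):
--     splittables = [
--         "Ability:", "EVs:", "IVs:", "Shiny:", "Gigantamax:", "Ball:", "- ", "Level:",
--         "Happiness:", "Language:", "OT:", "OTGender:", "TID:", "SID:", "Alpha:", "Tera Type:",
--         "Adamant Nature", "Bashful Nature", "Brave Nature", "Bold Nature", "Calm Nature",
--         "Careful Nature", "Docile Nature", "Gentle Nature", "Hardy Nature", "Hasty Nature",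
--         "Impish Nature", "Jolly Nature", "Lax Nature", "Lonely Nature", "Mild Nature",
--         "Modest Nature", "Naive Nature", "Naughty Nature", "Quiet Nature", "Quirky Nature",
--         "Rash Nature", "Relaxed Nature", "Sassy Nature", "Serious Nature", "Timid Nature",
--         "*",
--     ]
--
--     for i in splittables:
--         if i in set_details:
--             set_details = set_details.replace(i, f"\n{i}")
--
--     return set_details
-- ===== SOURCE B (Python) =====
-- import re
--
-- _MARKERS = [
--     "Ability:", "EVs:", "IVs:", "Shiny:", "Gigantamax:", "Ball:", "- ", "Level:",
--     "Happiness:", "Language:", "OT:", "OTGender:", "TID:", "SID:", "Alpha:", "Tera Type:",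
--     "Adamant Nature", "Bashful Nature", "Brave Nature", "Bold Nature", "Calm Nature",
--     "Careful Nature", "Docile Nature", "Gentle Nature", "Hardy Nature", "Hasty Nature",
--     "Impish Nature", "Jolly Nature", "Lax Nature", "Lonely Nature", "Mild Nature",
--     "Modest Nature", "Naive Nature", "Naughty Nature", "Quiet Nature", "Quirky Nature",
--     "Rash Nature", "Relaxed Nature", "Sassy Nature", "Serious Nature", "Timid Nature",
--     "*",
-- ]
--
-- _PATTERN = re.compile("|".join(re.escape(m) for m in _MARKERS))
--
--
-- def format_set_details(set_details):
--     # One left-to-right pass: prepend a newline to every marker occurrence.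
--     return _PATTERN.sub(lambda m: "\n" + m.group(0), set_details)
-- ===== Notes on version B (the rewrite author's own statement) =====
-- stated objective: idiomatic
-- what changed: Replaced the 42 sequential whole-string str.replace passes by one compiled alternation regex that makes a single left-to-right pass and prepends a newline to each marker match (sound because no marker is a prefix of, contained in, or overlaps another).
import Mathlib
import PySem

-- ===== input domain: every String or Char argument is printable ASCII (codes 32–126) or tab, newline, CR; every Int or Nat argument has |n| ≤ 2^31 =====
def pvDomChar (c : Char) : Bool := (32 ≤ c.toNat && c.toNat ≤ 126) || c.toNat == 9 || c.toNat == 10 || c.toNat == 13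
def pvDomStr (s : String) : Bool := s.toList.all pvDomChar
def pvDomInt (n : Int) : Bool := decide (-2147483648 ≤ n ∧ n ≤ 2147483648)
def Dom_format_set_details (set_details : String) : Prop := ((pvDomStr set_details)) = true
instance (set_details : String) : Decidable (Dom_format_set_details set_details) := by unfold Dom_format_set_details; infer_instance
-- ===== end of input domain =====

-- B replaces A's 42 sequential whole-string replace passes by ONE left-to-right pass that
-- prepends '\n' to each marker match (a compiled alternation regex in Python); same return value.

-- ===== PORT A =====
def splittables : List String := [
    "Ability:", "EVs:", "IVs:", "Shiny:", "Gigantamax:", "Ball:", "- ", "Level:",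
    "Happiness:", "Language:", "OT:", "OTGender:", "TID:", "SID:", "Alpha:", "Tera Type:",
    "Adamant Nature", "Bashful Nature", "Brave Nature", "Bold Nature", "Calm Nature",
    "Careful Nature", "Docile Nature", "Gentle Nature", "Hardy Nature", "Hasty Nature",
    "Impish Nature", "Jolly Nature", "Lax Nature", "Lonely Nature", "Mild Nature",
    "Modest Nature", "Naive Nature", "Naughty Nature", "Quiet Nature", "Quirky Nature",
    "Rash Nature", "Relaxed Nature", "Sassy Nature", "Serious Nature", "Timid Nature",
    "*"]

def format_set_details (set_details : String) : String :=
  splittables.foldl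
    (fun s i => if PySem.Str.isIn i s then PySem.Str.replace s i ("\n" ++ i) else s)
    set_details

-- ===== PORT B =====
-- Source B's marker list (as char lists); the compiled pattern is the literal alternation of these,
-- in this order, every marker re.escape'd.
def pvAltMarkers : List (List Char) := [
    "Ability:".toList, "EVs:".toList, "IVs:".toList, "Shiny:".toList, "Gigantamax:".toList,
    "Ball:".toList, "- ".toList, "Level:".toList,
    "Happiness:".toList, "Language:".toList, "OT:".toList, "OTGender:".toList, "TID:".toList,
    "SID:".toList, "Alpha:".toList, "Tera Type:".toList,
    "Adamant Nature".toList, "Bashful Nature".toList, "Brave Nature".toList, "Bold Nature".toList,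
    "Calm Nature".toList, "Careful Nature".toList, "Docile Nature".toList, "Gentle Nature".toList,
    "Hardy Nature".toList, "Hasty Nature".toList, "Impish Nature".toList, "Jolly Nature".toList,
    "Lax Nature".toList, "Lonely Nature".toList, "Mild Nature".toList, "Modest Nature".toList,
    "Naive Nature".toList, "Naughty Nature".toList, "Quiet Nature".toList, "Quirky Nature".toList,
    "Rash Nature".toList, "Relaxed Nature".toList, "Sassy Nature".toList, "Serious Nature".toList,
    "Timid Nature".toList, "*".toList]

-- the regex engine's match attempt at one position: first alternative (in pattern order)
-- that matches here; literal alternation = first marker that is a prefix of the rest.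
def pvFirstMatch (L : List (List Char)) (s : List Char) : Option (List Char) :=
  L.find? (fun m => m.isPrefixOf s)

-- hand port of _PATTERN.sub(lambda m: "\n" + m.group(0), s): one left-to-right scan; at each
-- position try the alternatives in order; on a match emit '\n' ++ match and resume after it.
-- (exact for a literal alternation with no empty alternative; 't.drop (m.length - 1)' is
-- '(c :: t).drop m.length' for the nonempty markers, written on t for termination)
def pvSub (L : List (List Char)) : List Char → List Char
  | [] => []
  | c :: t =>
    match pvFirstMatch L (c :: t) with
    | some m => '\n' :: (m ++ pvSub L (t.drop (m.length - 1)))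
    | none => c :: pvSub L t
termination_by s => s.length
decreasing_by all_goals (simp only [List.length_drop, List.length_cons]; omega)

def format_set_details_alt (set_details : String) : String :=
  String.ofList (pvSub pvAltMarkers set_details.toList)

-- ===== PRECONDITION & SPEC =====
def Spec_format_set_details (set_details : String) (out : String) : Prop := out = format_set_details_alt set_details
instance (set_details : String) (out : String) : Decidable (Spec_format_set_details set_details out) := by unfold Spec_format_set_details; infer_instance

-- ===== CLAIM (what is proved, stated in full; the proofs are below) =====
def Claim_equal_format_set_details : Prop := ∀ (set_details : String), Dom_format_set_details set_details → Spec_format_set_details set_details (format_set_details set_details)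

-- ===== LEMMAS AND PROOFS =====

-- A's str.replace, written as the same left-to-right scan PySem.Chars.replace.go performs
def coreRep (m nm : List Char) : List Char → List Char
  | [] => []
  | c :: t =>
    if m.isPrefixOf (c :: t) then nm ++ coreRep m nm (t.drop (m.length - 1))
    else c :: coreRep m nm t
termination_by s => s.length
decreasing_by all_goals (simp only [List.length_drop, List.length_cons]; omega)

-- the side conditions on the marker list that make one pass equal the sequential replaces
def goodList (L : List (List Char)) : Prop :=
  L.Nodup ∧ (∀ l ∈ L, l ≠ [] ∧ '\n' ∉ l) ∧
  (∀ a ∈ L, ∀ b ∈ L, a ≠ b → ¬ a <+: b) ∧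
  (∀ a ∈ L, ∀ b ∈ L, ∀ k, k < a.length → 0 < k → ¬ (a.drop k <+: b) ∧ ¬ (b <+: a.drop k))

set_option maxHeartbeats 8000000 in
lemma goodMarkers : goodList pvAltMarkers := by unfold goodList; decide

lemma goodTail {m : List Char} {L : List (List Char)} (h : goodList (m :: L)) :
    goodList L ∧ m ∉ L := by
  obtain ⟨hnd, hne, hpre, hov⟩ := h
  rw [List.nodup_cons] at hnd
  refine ⟨⟨hnd.2, fun l hl => hne l (List.mem_cons_of_mem _ hl),
    fun a ha b hb => hpre a (List.mem_cons_of_mem _ ha) b (List.mem_cons_of_mem _ hb),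
    fun a ha b hb => hov a (List.mem_cons_of_mem _ ha) b (List.mem_cons_of_mem _ hb)⟩, hnd.1⟩

lemma prefix_split {l u v : List Char} (h : l <+: u ++ v) : l <+: u ∨ u <+: l := by
  rcases Nat.le_total l.length u.length with hle | hle
  · exact Or.inl (List.prefix_of_prefix_length_le h (u.prefix_append v) hle)
  · exact Or.inr (List.prefix_of_prefix_length_le (u.prefix_append v) h hle)

lemma replace_go_eq (m nm : List Char) (hm : m ≠ []) :
    ∀ (fuel : Nat) (l acc : List Char), l.length ≤ fuel →
      PySem.Chars.replace.go m nm fuel l acc = acc.reverse ++ coreRep m nm l := by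
  intro fuel
  induction fuel with
  | zero =>
    intro l acc h
    have : l = [] := List.length_eq_zero_iff.mp (Nat.le_zero.mp h)
    subst this
    simp [PySem.Chars.replace.go, coreRep]
  | succ fuel ih =>
    intro l acc h
    cases l with
    | nil => simp [PySem.Chars.replace.go, coreRep]
    | cons c t =>
      rw [PySem.Chars.replace.go, coreRep]
      obtain ⟨a, m', rfl⟩ : ∃ a m', m = a :: m' := by
        cases m with
        | nil => exact absurd rfl hm
        | cons a m' => exact ⟨a, m', rfl⟩
      split
      · rw [ih]
        · simp [List.drop_succ_cons]
        · simp only [List.length_cons, List.drop_succ_cons, List.length_drop] at h ⊢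
          omega
      · rw [ih t (c :: acc) (by simpa using Nat.le_of_succ_le_succ (by simpa using h))]
        simp

lemma replace_eq_core {m : List Char} (nm : List Char) (hm : m ≠ []) (s : List Char) :
    PySem.Chars.replace s m nm = coreRep m nm s := by
  rw [PySem.Chars.replace]
  rw [if_neg (by simpa [List.isEmpty_iff] using hm)]
  simpa using replace_go_eq m nm hm s.length s [] (Nat.le_refl _)

lemma core_id {m : List Char} (nm : List Char)
    {s : List Char} (h : PySem.Chars.isIn m s = false) : coreRep m nm s = s := by
  induction s with
  | nil => rw [coreRep]
  | cons c t ih =>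
    rw [coreRep]
    rw [if_neg]
    · rw [ih]
      rw [PySem.Chars.isIn_eq_false_iff] at h ⊢
      exact fun hin => h (List.infix_cons hin)
    · intro hp
      rw [PySem.Chars.isIn_eq_false_iff] at h
      exact h (List.isPrefixOf_iff_prefix.mp hp).isInfix

lemma core_chunk {m : List Char} (nm : List Char) :
    ∀ (n : Nat) (u : List Char), (∀ k, k < n → ¬ m.isPrefixOf (u.drop k)) →
      coreRep m nm u = u.take n ++ coreRep m nm (u.drop n) := by
  intro n
  induction n with
  | zero => intro u _; simp
  | succ n ih =>
    intro u h
    cases u with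
    | nil => simp [coreRep]
    | cons c t =>
      rw [coreRep, if_neg (by simpa using h 0 (Nat.succ_pos n))]
      rw [ih t (fun k hk => by simpa [List.drop_succ_cons] using h (k + 1) (by omega))]
      simp

lemma core_back {m : List Char} :
    ∀ (u l : List Char), '\n' ∉ l → l <+: coreRep m ('\n' :: m) u → l <+: u := by
  intro u
  induction u with
  | nil => intro l _ h; rw [coreRep] at h; simpa using h
  | cons c t ih =>
    intro l hnl h
    rw [coreRep] at h
    split at h
    · cases l with
      | nil => exact List.nil_prefix
      | cons c' l' =>
        rw [List.cons_append] at h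
        exact absurd (by rw [(List.cons_prefix_cons.mp h).1]; exact List.mem_cons_self ..) hnl
    · cases l with
      | nil => exact List.nil_prefix
      | cons c' l' =>
        obtain ⟨rfl, h'⟩ := List.cons_prefix_cons.mp h
        exact List.cons_prefix_cons.mpr ⟨rfl, ih l' (fun hm' => hnl (List.mem_cons_of_mem _ hm')) h'⟩

lemma pvSub_nil : ∀ s : List Char, pvSub [] s = s := by
  intro s
  induction s with
  | nil => rw [pvSub]
  | cons c t ih => rw [pvSub]; simp [pvFirstMatch, ih]

lemma pvSub_shift {L : List (List Char)} :
    ∀ (p X : List Char), (∀ k, k < p.length → ∀ l ∈ L, ¬ l.isPrefixOf ((p ++ X).drop k)) →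
      pvSub L (p ++ X) = p ++ pvSub L X := by
  intro p
  induction p with
  | nil => intro X _; simp
  | cons a p' ih =>
    intro X h
    rw [List.cons_append, pvSub]
    have hfm : pvFirstMatch L (a :: (p' ++ X)) = none := by
      unfold pvFirstMatch
      rw [List.find?_eq_none]
      intro l hl
      simpa using h 0 (Nat.succ_pos _) l hl
    rw [hfm, ih X (fun k hk l hl => by simpa [List.drop_succ_cons] using h (k + 1) (by simpa using hk) l hl)]
    rfl

lemma firstMatch_congr {L : List (List Char)} {s t : List Char}
    (h : ∀ l ∈ L, l.isPrefixOf s = l.isPrefixOf t) : pvFirstMatch L s = pvFirstMatch L t := by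
  induction L with
  | nil => rfl
  | cons a L ih =>
    unfold pvFirstMatch at *
    simp only [List.find?]
    rw [h a (List.mem_cons_self ..)]
    cases a.isPrefixOf t
    · exact ih fun l hl => h l (List.mem_cons_of_mem _ hl)
    · rfl

lemma pvSub_newline {L : List (List Char)} (hL : ∀ l ∈ L, l ≠ [] ∧ '\n' ∉ l) (X : List Char) :
    pvSub L ('\n' :: X) = '\n' :: pvSub L X := by
  rw [pvSub]
  have hfm : pvFirstMatch L ('\n' :: X) = none := by
    unfold pvFirstMatch
    rw [List.find?_eq_none]
    intro l hl
    obtain ⟨hne, hnl⟩ := hL l hl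
    cases l with
    | nil => exact absurd rfl hne
    | cons c l' =>
      simp only [Bool.not_eq_true]
      rw [Bool.eq_false_iff]
      intro hp
      exact hnl (by rw [(List.cons_prefix_cons.mp (List.isPrefixOf_iff_prefix.mp hp)).1]; exact List.mem_cons_self ..)
  rw [hfm]

-- no marker of the pool can start strictly inside an occurrence of marker `a`
lemma no_inner {L : List (List Char)} (hg : goodList L)
    {a b : List Char} (ha : a ∈ L) (hb : b ∈ L) {r : List Char} {k : Nat}
    (hk0 : 0 < k) (hk : k < a.length) : ¬ b.isPrefixOf ((a ++ r).drop k) := by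
  intro hpre
  have h := List.isPrefixOf_iff_prefix.mp hpre
  rw [List.drop_append_of_le_length (Nat.le_of_lt hk)] at h
  rcases prefix_split h with h1 | h1
  · exact (hg.2.2.2 a ha b hb k hk hk0).2 h1
  · exact (hg.2.2.2 a ha b hb k hk hk0).1 h1

lemma key_lemma {m : List Char} {L : List (List Char)}
    (hg : goodList (m :: L)) (hnm : m ∉ L) :
    ∀ s : List Char, pvSub L (coreRep m ('\n' :: m) s) = pvSub (m :: L) s := by
  have hmem : m ∈ m :: L := List.mem_cons_self ..
  have hm_ne : m ≠ [] := (hg.2.1 m hmem).1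
  have hLg : goodList L := (goodTail hg).1
  have hLne : ∀ l ∈ L, l ≠ [] ∧ '\n' ∉ l :=
    fun l hl => hg.2.1 l (List.mem_cons_of_mem _ hl)
  have H : ∀ (n : Nat) (s : List Char), s.length ≤ n →
      pvSub L (coreRep m ('\n' :: m) s) = pvSub (m :: L) s := by
    intro n
    induction n with
    | zero =>
      intro s hs
      have : s = [] := List.length_eq_zero_iff.mp (Nat.le_zero.mp hs)
      subst this
      rw [coreRep, pvSub, pvSub]
    | succ n ih =>
      intro s hs
      cases s with
      | nil => rw [coreRep, pvSub, pvSub]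
      | cons c t =>
        by_cases hp : m.isPrefixOf (c :: t) = true
        · -- a match of m at this position: both sides emit '\n' ++ m and resume after it
          have hdrop : List.drop (m.length - 1) t = List.drop m.length (c :: t) := by
            obtain ⟨a, m', rfl⟩ : ∃ a m', m = a :: m' := by
              cases m with
              | nil => exact absurd rfl hm_ne
              | cons a m' => exact ⟨a, m', rfl⟩
            simp [List.drop_succ_cons]
          rw [coreRep, if_pos hp, List.cons_append, pvSub_newline hLne]
          have hshift : ∀ k, k < m.length → ∀ l ∈ L,
              ¬ l.isPrefixOf ((m ++ coreRep m ('\n' :: m) (List.drop (m.length - 1) t)).drop k) = true := by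
            intro k hk l hl
            rcases Nat.eq_zero_or_pos k with rfl | hk0
            · simp only [List.drop_zero]
              intro hpre
              rcases prefix_split (List.isPrefixOf_iff_prefix.mp hpre) with h1 | h1
              · exact hg.2.2.1 l (List.mem_cons_of_mem _ hl) m hmem
                  (fun h => hnm (h ▸ hl)) h1
              · exact hg.2.2.1 m hmem l (List.mem_cons_of_mem _ hl)
                  (fun h => hnm (h ▸ hl)) h1
            · exact no_inner hg hmem (List.mem_cons_of_mem _ hl) hk0 hk
          rw [pvSub_shift m _ hshift]
          have hlen : (List.drop (m.length - 1) t).length ≤ n := by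
            simp only [List.length_drop]
            simp only [List.length_cons] at hs
            omega
          rw [ih _ hlen]
          conv_rhs => rw [pvSub]
          rw [show pvFirstMatch (m :: L) (c :: t) = some m from
            List.find?_cons_of_pos hp]
        · -- no match of m here: the two scans see the same head and the same match set
          have hstep : coreRep m ('\n' :: m) (c :: t) = c :: coreRep m ('\n' :: m) t := by
            rw [coreRep, if_neg hp]
          -- matching any l ∈ L at this position is unaffected by the pending m-replacements
          have hmi : ∀ l ∈ L, l.isPrefixOf (c :: coreRep m ('\n' :: m) t) = l.isPrefixOf (c :: t) := by
            intro l hl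
            cases hb : l.isPrefixOf (c :: t) with
            | false =>
              rw [Bool.eq_false_iff]
              intro htrue
              rw [← hstep] at htrue
              have := core_back (c :: t) l (hLne l hl).2
                (List.isPrefixOf_iff_prefix.mp htrue)
              rw [Bool.eq_false_iff] at hb
              exact hb (List.isPrefixOf_iff_prefix.mpr this)
            | true =>
              obtain ⟨r, hr⟩ := List.isPrefixOf_iff_prefix.mp hb
              have hno : ∀ k, k < l.length → ¬ m.isPrefixOf ((c :: t).drop k) = true := by
                intro k hk
                rcases Nat.eq_zero_or_pos k with rfl | hk0
                · simpa using hp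
                · rw [← hr]
                  exact no_inner hg (List.mem_cons_of_mem _ hl) hmem hk0 hk
              have htake : List.take l.length (c :: t) = l :=
                (List.prefix_iff_eq_take.mp (List.isPrefixOf_iff_prefix.mp hb)).symm
              have hchunk := core_chunk ('\n' :: m) l.length (c :: t) hno
              rw [htake] at hchunk
              rw [← hstep, hchunk]
              exact List.isPrefixOf_iff_prefix.mpr (l.prefix_append _)
          have hfm : pvFirstMatch L (c :: coreRep m ('\n' :: m) t) = pvFirstMatch L (c :: t) :=
            firstMatch_congr hmi
          have hfm2 : pvFirstMatch (m :: L) (c :: t) = pvFirstMatch L (c :: t) :=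
            List.find?_cons_of_neg hp
          rw [hstep, pvSub]
          conv_rhs => rw [pvSub]
          rw [hfm, hfm2]
          cases hcase : pvFirstMatch L (c :: t) with
          | none =>
            simp only
            rw [ih t (by simpa using Nat.le_of_succ_le_succ (by simpa using hs))]
          | some l =>
            simp only
            have hcase' : List.find? (fun m0 => m0.isPrefixOf (c :: t)) L = some l := hcase
            have hlL : l ∈ L := List.mem_of_find?_eq_some hcase'
            have hlp : l.isPrefixOf (c :: t) = true :=
              List.find?_some (p := fun m0 : List Char => m0.isPrefixOf (c :: t)) hcase'
            have hl_ne : l ≠ [] := (hLne l hlL).1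
            obtain ⟨r, hr⟩ := List.isPrefixOf_iff_prefix.mp hlp
            -- both recursions continue on v = (c :: t).drop l.length, A's side after coreRep
            have hno : ∀ k, k < l.length → ¬ m.isPrefixOf ((c :: t).drop k) = true := by
              intro k hk
              rcases Nat.eq_zero_or_pos k with rfl | hk0
              · simpa using hp
              · rw [← hr]
                exact no_inner hg (List.mem_cons_of_mem _ hlL) hmem hk0 hk
            have htake : List.take l.length (c :: t) = l :=
              (List.prefix_iff_eq_take.mp (List.isPrefixOf_iff_prefix.mp hlp)).symm
            have hchunk := core_chunk ('\n' :: m) l.length (c :: t) hno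
            rw [htake] at hchunk
            obtain ⟨a, l', rfl⟩ : ∃ a l', l = a :: l' := by
              cases l with
              | nil => exact absurd rfl hl_ne
              | cons a l' => exact ⟨a, l', rfl⟩
            have hdropA : List.drop ((a :: l').length - 1) (coreRep m ('\n' :: m) t)
                = coreRep m ('\n' :: m) (List.drop (a :: l').length (c :: t)) := by
              have h1 : List.drop ((a :: l').length - 1) (coreRep m ('\n' :: m) t)
                  = List.drop (a :: l').length (c :: coreRep m ('\n' :: m) t) := by
                simp [List.drop_succ_cons]
              rw [h1, ← hstep, hchunk]
              exact List.drop_left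
            have hdropB : List.drop ((a :: l').length - 1) t = List.drop (a :: l').length (c :: t) := by
              simp [List.drop_succ_cons]
            rw [hdropA, hdropB]
            have hlen : (List.drop (a :: l').length (c :: t)).length ≤ n := by
              simp only [List.length_drop, List.length_cons] at hs ⊢
              omega
            rw [ih _ hlen]
  exact fun s => H s.length s (Nat.le_refl _)

lemma main_chars : ∀ (L : List (List Char)), goodList L →
    ∀ s : List Char, L.foldl (fun s m => coreRep m ('\n' :: m) s) s = pvSub L s := by
  intro L
  induction L with
  | nil => intro _ s; exact (pvSub_nil s).symm
  | cons m L ih =>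
    intro hg s
    obtain ⟨hLg, hnm⟩ := goodTail hg
    rw [List.foldl_cons, ih hLg, key_lemma hg hnm]

lemma guard_to_core : ∀ (L : List (List Char)), (∀ m ∈ L, m ≠ []) →
    ∀ s : List Char,
      L.foldl (fun s m => if PySem.Chars.isIn m s then PySem.Chars.replace s m ('\n' :: m) else s) s
        = L.foldl (fun s m => coreRep m ('\n' :: m) s) s := by
  intro L
  induction L with
  | nil => intro _ s; rfl
  | cons m L ih =>
    intro h s
    have hm : m ≠ [] := h m (List.mem_cons_self ..)
    rw [List.foldl_cons, List.foldl_cons,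
      ih (fun l hl => h l (List.mem_cons_of_mem _ hl))]
    congr 1
    cases hin : PySem.Chars.isIn m s with
    | true => rw [if_pos rfl, replace_eq_core _ hm]
    | false => rw [if_neg (by simp), core_id _ hin]

lemma str_fold : ∀ (L : List String) (s : String),
    (L.foldl (fun s i => if PySem.Str.isIn i s then PySem.Str.replace s i ("\n" ++ i) else s) s).toList
      = (L.map String.toList).foldl
          (fun s m => if PySem.Chars.isIn m s then PySem.Chars.replace s m ('\n' :: m) else s) s.toList := by
  intro L
  induction L with
  | nil => intro s; rfl
  | cons i L ih =>
    intro s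
    rw [List.map_cons, List.foldl_cons, List.foldl_cons, ih]
    congr 1
    rw [PySem.Str.isIn_eq]
    cases hin : PySem.Chars.isIn i.toList s.toList with
    | true =>
      rw [if_pos rfl, if_pos rfl, PySem.Str.toList_replace]
      congr 1
      rw [String.toList_append]
      rfl
    | false => rw [if_neg (by simp), if_neg (by simp)]

lemma markers_map : splittables.map String.toList = pvAltMarkers := by decide

-- ===== VERDICT (by name: the statement is the Claim_ definition above) =====
theorem format_set_details_spec : Claim_equal_format_set_details := by
  intro s _
  unfold Spec_format_set_details format_set_details format_set_details_alt
  have h1 : (splittables.foldl (fun s i => if PySem.Str.isIn i s then PySem.Str.replace s i ("\n" ++ i) else s) s).toList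
      = pvSub pvAltMarkers s.toList := by
    rw [str_fold, markers_map,
      guard_to_core pvAltMarkers (fun m hm => (goodMarkers.2.1 m hm).1),
      main_chars pvAltMarkers goodMarkers]
  calc (splittables.foldl (fun s i => if PySem.Str.isIn i s then PySem.Str.replace s i ("\n" ++ i) else s) s)
      = String.ofList (splittables.foldl (fun s i => if PySem.Str.isIn i s then PySem.Str.replace s i ("\n" ++ i) else s) s).toList := String.ofList_toList.symm
    _ = String.ofList (pvSub pvAltMarkers s.toList) := by rw [h1]
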